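-- pv_equiv track=rewrite | github.com/ankitsharmax/Competitive-programming-using-python | Day 6/fair_elections.py | cheat_vote
-- ===== SOURCE A (Python) =====
-- def cheat_vote(n,m):
-- 	sum_n = sum(n)
-- 	sum_m = sum(m)
-- 	if sum_n > sum_m:
-- 		return 0
-- 	else:
-- 		count = 1
-- 		for i in range(min(len(n),len(m))):
-- 			n[i],m[i] = m[i],n[i]
-- 			sum_n_new = sum(n)
-- 			sum_m_new = sum(m)
-- 			if sum_n_new > sum_m_new:
-- 				return count
-- 			else:
-- 				count += 1
-- 		return -1
-- ===== SOURCE B (Python) =====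
-- def cheat_vote(n, m):
--     # O(N): maintain diff = sum(n) - sum(m), update by the swap delta each step.
--     # (A mutates n and m in place; B does not -- equivalence is about the return value.)
--     diff = sum(n) - sum(m)
--     if diff > 0:
--         return 0
--     for i, (a, b) in enumerate(zip(n, m)):
--         diff += 2 * (b - a)
--         if diff > 0:
--             return i + 1
--     return -1
-- ===== Notes on version B (the rewrite author's own statement) =====
-- stated objective: faster
-- what changed: Instead of re-summing both whole lists after every swap, B keeps one running difference sum(n)-sum(m) and updates it by the swap delta 2*(m[i]-n[i]) per step (and B does not mutate its arguments).
import Mathlib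
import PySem

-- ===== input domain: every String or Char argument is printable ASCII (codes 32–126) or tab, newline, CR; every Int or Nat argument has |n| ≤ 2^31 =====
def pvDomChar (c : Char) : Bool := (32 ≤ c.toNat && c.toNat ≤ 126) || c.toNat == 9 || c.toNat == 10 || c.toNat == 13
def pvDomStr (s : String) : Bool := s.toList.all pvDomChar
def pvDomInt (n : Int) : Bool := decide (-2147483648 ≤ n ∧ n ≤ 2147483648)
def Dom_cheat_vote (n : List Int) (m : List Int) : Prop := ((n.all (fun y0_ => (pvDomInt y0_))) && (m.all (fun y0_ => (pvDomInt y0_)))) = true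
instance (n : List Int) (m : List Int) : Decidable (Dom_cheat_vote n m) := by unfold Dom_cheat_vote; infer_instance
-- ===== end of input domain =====

-- B replaces A's per-step full re-summation by a single running difference updated
-- by the swap delta each step (O(N) vs O(k*N)); A mutates n and m in place, B does not:
-- the equivalence proved here is about the return value only.

-- ===== PORT A =====
def cheatLoopA (n : List Int) (m : List Int) (count : Int) : List Nat → Int
  | [] => -1
  | i :: rest =>
    let n' := n.set i (m.getD i 0)
    let m' := m.set i (n.getD i 0)
    if n'.sum > m'.sum then count
    else cheatLoopA n' m' (count + 1) rest

def cheat_vote (n : List Int) (m : List Int) : Int :=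
  if n.sum > m.sum then 0
  else cheatLoopA n m 1 (List.range (min n.length m.length))

-- ===== PORT B =====
def cheatLoopB : List (Int × Int) → Int → Int → Int
  | [], _, _ => -1
  | (a, b) :: rest, diff, i =>
    let diff' := diff + 2 * (b - a)
    if diff' > 0 then i + 1 else cheatLoopB rest diff' (i + 1)

def cheat_vote_alt (n : List Int) (m : List Int) : Int :=
  let diff := n.sum - m.sum
  if diff > 0 then 0 else cheatLoopB (n.zip m) diff 0

-- ===== PRECONDITION & SPEC =====
def Spec_cheat_vote (n : List Int) (m : List Int) (out : Int) : Prop := out = cheat_vote_alt n m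
instance (n : List Int) (m : List Int) (out : Int) : Decidable (Spec_cheat_vote n m out) := by unfold Spec_cheat_vote; infer_instance

-- ===== CLAIM (what is proved, stated in full; the proofs are below) =====
def Claim_equal_cheat_vote : Prop := ∀ (n : List Int) (m : List Int), Dom_cheat_vote n m → Spec_cheat_vote n m (cheat_vote n m)

-- ===== LEMMAS AND PROOFS =====

lemma sum_set (l : List Int) (i : Nat) (v : Int) (h : i < l.length) :
    (l.set i v).sum = l.sum - l[i] + v := by
  induction l generalizing i with
  | nil => simp at h
  | cons x xs ih =>
    cases i with
    | zero => simp [List.set]; ring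
    | succ j =>
      simp only [List.set, List.sum_cons, List.getElem_cons_succ]
      rw [ih j (by simpa using h)]
      ring

lemma loop_eq : ∀ (k j : Nat) (n m : List Int),
    j + k = min n.length m.length →
    cheatLoopA n m ((j : Int) + 1) (List.range' j k) =
      cheatLoopB ((n.drop j).zip (m.drop j)) (n.sum - m.sum) (j : Int) := by
  intro k
  induction k with
  | zero =>
    intro j n m hj
    have hz : (n.drop j).zip (m.drop j) = [] := by
      by_cases hle : n.length ≤ m.length
      · have : n.drop j = [] := List.drop_eq_nil_of_le (by omega)
        simp [this]
      · have : m.drop j = [] := List.drop_eq_nil_of_le (by omega)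
        simp [this]
    simp [cheatLoopA, cheatLoopB, hz]
  | succ k ih =>
    intro j n m hj
    have hn : j < n.length := by omega
    have hm : j < m.length := by omega
    have hdn : n.drop j = n[j] :: n.drop (j + 1) := List.drop_eq_getElem_cons hn
    have hdm : m.drop j = m[j] :: m.drop (j + 1) := List.drop_eq_getElem_cons hm
    have hget_n : n.getD j 0 = n[j] := List.getD_eq_getElem n 0 hn
    have hget_m : m.getD j 0 = m[j] := List.getD_eq_getElem m 0 hm
    have hsn : (n.set j (m.getD j 0)).sum = n.sum - n[j] + m[j] := by
      rw [hget_m]; exact sum_set n j m[j] hn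
    have hsm : (m.set j (n.getD j 0)).sum = m.sum - m[j] + n[j] := by
      rw [hget_n]; exact sum_set m j n[j] hm
    rw [List.range'_succ]
    simp only [cheatLoopA, hdn, hdm, List.zip_cons_cons, cheatLoopB]
    have hcond : (n.set j (m.getD j 0)).sum > (m.set j (n.getD j 0)).sum ↔
        n.sum - m.sum + 2 * (m[j] - n[j]) > 0 := by
      rw [hsn, hsm]; omega
    by_cases hc : n.sum - m.sum + 2 * (m[j] - n[j]) > 0
    · rw [if_pos (hcond.mpr hc), if_pos hc]
    · rw [if_neg (fun h => hc (hcond.mp h)), if_neg hc]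
      have ihc := ih (j + 1) (n.set j (m.getD j 0)) (m.set j (n.getD j 0))
        (by simp [List.length_set]; omega)
      have hdrop_n : (n.set j (m.getD j 0)).drop (j + 1) = n.drop (j + 1) := by
        rw [List.drop_set]; simp
      have hdrop_m : (m.set j (n.getD j 0)).drop (j + 1) = m.drop (j + 1) := by
        rw [List.drop_set]; simp
      rw [hdrop_n, hdrop_m, hsn, hsm] at ihc
      have harg : n.sum - n[j] + m[j] - (m.sum - m[j] + n[j]) =
          n.sum - m.sum + 2 * (m[j] - n[j]) := by ring
      rw [harg] at ihc
      push_cast at ihc ⊢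
      exact ihc

theorem cheat_vote_spec : Claim_equal_cheat_vote := by
  intro n m _
  unfold Spec_cheat_vote cheat_vote cheat_vote_alt
  by_cases h : n.sum > m.sum
  · rw [if_pos h, if_pos (by omega : n.sum - m.sum > 0)]
  · rw [if_neg h, if_neg (by omega : ¬ n.sum - m.sum > 0)]
    have := loop_eq (min n.length m.length) 0 n m (by omega)
    simpa [List.range_eq_range'] using this
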